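-- pv_equiv track=rewrite | github.com/tsoutonglang/CS484-Fall-2022 | assignment3/soutonglang-tania-assignment3.py | splitOptimal
-- ===== SOURCE A (Python) =====
-- def splitOptimal(combos):
--     minInt = 0
--     minVar = combos[0][1]
--     for i in range(len(combos)):
--         if minVar > combos[i][1]:
--             minVar = combos[i][1]
--             minInt = i
--     return combos[minInt]
-- ===== SOURCE B (Python) =====
-- def splitOptimal(combos):
--     return sorted(combos, key=lambda c: c[1])[0]
-- ===== Notes on version B (the rewrite author's own statement) =====
-- stated objective: idiomatic
-- what changed: B replaces A's index-tracking running-minimum loop over range(len(combos)) with a stable sort by the second component followed by taking the first element; stability preserves A's first-occurrence tie rule.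
import Mathlib
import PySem

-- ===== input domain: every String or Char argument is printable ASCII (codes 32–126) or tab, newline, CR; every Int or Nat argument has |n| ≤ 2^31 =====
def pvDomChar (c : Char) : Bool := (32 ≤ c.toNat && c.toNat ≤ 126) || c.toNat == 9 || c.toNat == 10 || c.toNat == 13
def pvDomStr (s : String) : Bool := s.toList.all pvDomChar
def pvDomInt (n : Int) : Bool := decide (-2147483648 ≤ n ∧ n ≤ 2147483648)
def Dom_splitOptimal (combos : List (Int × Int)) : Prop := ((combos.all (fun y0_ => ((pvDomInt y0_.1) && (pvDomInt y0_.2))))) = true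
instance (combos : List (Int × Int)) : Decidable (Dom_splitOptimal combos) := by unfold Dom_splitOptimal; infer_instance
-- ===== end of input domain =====

-- B replaces A's index-tracking running-minimum scan by a stable sort on the
-- second component followed by taking the first element (idiomatic; same result,
-- first-occurrence ties preserved by stability). Pre_ excludes the empty list,
-- on which both Pythons raise IndexError.


-- ===== PORT A =====
-- Literal transliteration of A: minVar := combos[0][1]; for i in range(len(combos)):
-- track (minInt, minVar); return combos[minInt]. combos[0] and combos[minInt] are
-- pyGetD (Pre_ guarantees nonempty, so the default is never reached).
def splitOptimal (combos : List (Int × Int)) : Int × Int :=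
  let minVar : Int := (PySem.List.pyGetD combos 0 (0, 0)).2
  let st : Int × Int :=
    (PySem.List.pyRange 0 (combos.length : Int) 1).foldl
      (fun (st : Int × Int) (i : Int) =>
        if st.2 > (PySem.List.pyGetD combos i (0, 0)).2 then
          (i, (PySem.List.pyGetD combos i (0, 0)).2)
        else st)
      (0, minVar)
  PySem.List.pyGetD combos st.1 (0, 0)

-- ===== PORT B =====
-- Literal transliteration of B: sorted(combos, key=lambda c: c[1])[0].
def splitOptimal_alt (combos : List (Int × Int)) : Int × Int :=
  PySem.List.pyGetD (PySem.List.sorted combos (fun c => c.2) false) 0 (0, 0)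

-- ===== PRECONDITION & SPEC =====
-- Pre_ excludes only the empty list, where both Python versions raise IndexError.
def Pre_splitOptimal (combos : List (Int × Int)) : Prop := combos ≠ []
instance (combos : List (Int × Int)) : Decidable (Pre_splitOptimal combos) := by
  unfold Pre_splitOptimal; infer_instance

def pvWitness_splitOptimal : (List (Int × Int)) := ([(1, 2), (3, 1), (4, 1)])

def Spec_splitOptimal (combos : List (Int × Int)) (out : Int × Int) : Prop := out = splitOptimal_alt combos
instance (combos : List (Int × Int)) (out : Int × Int) : Decidable (Spec_splitOptimal combos out) := by unfold Spec_splitOptimal; infer_instance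

-- ===== CLAIM (what is proved, stated in full; the proofs are below) =====
def Claim_equal_splitOptimal : Prop := ∀ (combos : List (Int × Int)), Dom_splitOptimal combos → Pre_splitOptimal combos → Spec_splitOptimal combos (splitOptimal combos)

-- ===== LEMMAS AND PROOFS =====

-- the common "first minimum by second component" step both proofs reduce to
def pvStep (b c : Int × Int) : Int × Int := if c.2 < b.2 then c else b

-- B side: head of the stable insertion-sort fold is the running first-minimum.
theorem head_foldl_insertBy (xs : List (Int × Int)) (b : Int × Int) (bs : List (Int × Int)) :
    (xs.foldl (fun acc x => PySem.List.insertBy (fun a c => decide (a.2 < c.2)) x acc) (b :: bs)).head?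
      = some (xs.foldl pvStep b) := by
  induction xs generalizing b bs with
  | nil => rfl
  | cons x t ih =>
    simp only [List.foldl_cons, PySem.List.insertBy, pvStep]
    by_cases h : x.2 < b.2
    · simp [h, ih]
    · simp [h, ih]

theorem pyGetD_zero_head (l : List (Int × Int)) (d : Int × Int) :
    PySem.List.pyGetD l 0 d = l.head?.getD d := by
  cases l <;> simp [PySem.List.pyGetD, PySem.List.pyGet?, PySem.List.pyIdx?]

theorem alt_eq_foldl (c : Int × Int) (t : List (Int × Int)) :
    splitOptimal_alt (c :: t) = t.foldl pvStep c := by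
  unfold splitOptimal_alt
  rw [PySem.List.sorted_eq_foldl_insertBy, pyGetD_zero_head]
  simp only [List.foldl_cons]
  have h0 : PySem.List.insertBy (fun a c => decide (a.2 < c.2)) c ([] : List (Int × Int)) = [c] := rfl
  rw [h0, head_foldl_insertBy t c []]
  rfl

-- A side: the index-tracking range loop, read through pyGetD, is the same running
-- first-minimum.  Invariant: st.2 equals the second component of combos[st.1].
theorem a_loop (combos : List (Int × Int)) (n : Nat) :
    ∀ (a : Int) (st : Int × Int), 0 ≤ a → (combos.length : Int) - a ≤ (n : Int) →
    st.2 = (PySem.List.pyGetD combos st.1 (0, 0)).2 →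
    PySem.List.pyGetD combos
      ((PySem.List.pyRange a (combos.length : Int) 1).foldl
        (fun (st : Int × Int) (i : Int) =>
          if st.2 > (PySem.List.pyGetD combos i (0, 0)).2 then
            (i, (PySem.List.pyGetD combos i (0, 0)).2)
          else st) st).1 (0, 0)
      = (combos.drop a.toNat).foldl pvStep (PySem.List.pyGetD combos st.1 (0, 0)) := by
  induction n with
  | zero =>
    intro a st ha hn hinv
    have hge : (combos.length : Int) ≤ a := by omega
    rw [PySem.List.pyRange_one_eq_nil hge]
    have : combos.length ≤ a.toNat := by omega
    simp [List.drop_eq_nil_of_le this]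
  | succ n ih =>
    intro a st ha hn hinv
    by_cases hlt : a < (combos.length : Int)
    · rw [PySem.List.pyRange_one_cons hlt]
      simp only [List.foldl_cons]
      have hidx : a.toNat < combos.length := by omega
      have hget : PySem.List.pyGetD combos a (0, 0) = combos[a.toNat] := by
        have hca : a = ((a.toNat : Nat) : Int) := by omega
        conv_lhs => rw [hca, PySem.List.pyGetD_natCast]
        rw [List.getD_eq_getElem combos (0, 0) hidx]
      have hdrop : combos.drop a.toNat = combos[a.toNat] :: combos.drop (a.toNat + 1) := by
        rw [List.drop_eq_getElem_cons hidx]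
      have htoNat : (a + 1).toNat = a.toNat + 1 := by omega
      by_cases hc : st.2 > (PySem.List.pyGetD combos a (0, 0)).2
      · rw [if_pos hc]
        have := ih (a + 1) (a, (PySem.List.pyGetD combos a (0, 0)).2) (by omega) (by omega) (by simp)
        rw [this, hdrop, htoNat]
        simp only [List.foldl_cons]
        congr 1
        simp only [pvStep, hget]
        rw [if_pos (by rw [hget] at hc; omega)]
      · rw [if_neg hc]
        have := ih (a + 1) st (by omega) (by omega) hinv
        rw [this, hdrop, htoNat]
        simp only [List.foldl_cons]
        congr 1
        simp only [pvStep]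
        rw [if_neg (by rw [hget] at hc; omega)]
    · have hge : (combos.length : Int) ≤ a := by omega
      rw [PySem.List.pyRange_one_eq_nil hge]
      have : combos.length ≤ a.toNat := by omega
      simp [List.drop_eq_nil_of_le this]

theorem a_eq_foldl (c : Int × Int) (t : List (Int × Int)) :
    splitOptimal (c :: t) = t.foldl pvStep c := by
  unfold splitOptimal
  have h0 : PySem.List.pyGetD (c :: t) (0 : Int) (0, 0) = c := by
    simp [PySem.List.pyGetD, PySem.List.pyGet?, PySem.List.pyIdx?]
  have hmain := a_loop (c :: t) (c :: t).length 0 (0, c.2) le_rfl (by simp) (by rw [h0])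
  simp only [Int.toNat_zero, List.drop_zero] at hmain
  rw [h0] at hmain
  rw [h0, hmain]
  simp [pvStep]

-- ===== VERDICT (by name: the statement is the Claim_ definition above) =====
theorem splitOptimal_spec : Claim_equal_splitOptimal := by
  intro combos _ hpre
  unfold Spec_splitOptimal
  rcases combos with _ | ⟨c, t⟩
  · exact absurd rfl hpre
  · rw [a_eq_foldl, alt_eq_foldl]
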